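-- pv_equiv track=rewrite | github.com/YeseulLee0311/remove_MotionArtifact_PPG | SSA_PPG.py | getTimestamp
-- ===== SOURCE A (Python) =====
-- def getTimestamp(initial_time, datalength, fs):
--     timelist = []
--     flag = 0
--
--     for i in range(0, datalength):
--         timelist.append(initial_time)
--         flag += 1
--         if flag == fs:
--             initial_time += 1
--             flag = 0
--
--     return timelist
-- ===== SOURCE B (Python) =====
-- def getTimestamp(initial_time, datalength, fs):
--     timelist = []
--     t = initial_time
--     remaining = datalength
--     while remaining > 0:
--         n = min(fs, remaining) if fs > 0 else remaining
--         timelist.extend([t] * n)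
--         t += 1
--         remaining -= n
--     return timelist
-- ===== Notes on version B (the rewrite author's own statement) =====
-- stated objective: faster
-- what changed: B builds the list in whole runs (one extend of [t]*n per timestamp value) instead of A's per-sample append with a flag counter.
import Mathlib
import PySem

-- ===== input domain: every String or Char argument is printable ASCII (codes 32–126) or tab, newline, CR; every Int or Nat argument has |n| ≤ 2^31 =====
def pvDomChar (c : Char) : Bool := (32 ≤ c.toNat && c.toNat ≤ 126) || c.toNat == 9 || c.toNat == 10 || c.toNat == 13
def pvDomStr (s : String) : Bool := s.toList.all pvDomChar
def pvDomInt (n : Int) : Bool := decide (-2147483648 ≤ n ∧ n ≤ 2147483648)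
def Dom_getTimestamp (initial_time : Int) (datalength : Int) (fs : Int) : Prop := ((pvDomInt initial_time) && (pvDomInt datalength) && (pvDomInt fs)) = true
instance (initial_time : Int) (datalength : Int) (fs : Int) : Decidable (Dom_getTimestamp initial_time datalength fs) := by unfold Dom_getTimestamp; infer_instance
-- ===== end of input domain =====

-- B builds the timestamp list in whole runs (one block of `n` copies per timestamp value)
-- instead of A's per-sample append with a flag counter; objective: faster (constant-factor).


-- ===== PORT A =====
-- literal transliteration: for i in range(0, datalength) over state (timelist, initial_time, flag)
def getTimestamp (initial_time : Int) (datalength : Int) (fs : Int) : List Int :=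
  let s := (PySem.List.pyRange 0 datalength 1).foldl
    (fun (st : List Int × Int × Int) _ =>
      let timelist := st.1 ++ [st.2.1]
      let flag := st.2.2 + 1
      if flag = fs then (timelist, st.2.1 + 1, 0) else (timelist, st.2.1, flag))
    ([], initial_time, 0)
  s.1

-- ===== PORT B =====
-- while remaining > 0: n = min(fs, remaining) if fs > 0 else remaining; extend [t]*n; t += 1
def getTimestampAltAux (fs : Int) (t : Int) (remaining : Int) : List Int :=
  if _h : 0 < remaining then
    let n := if 0 < fs then min fs remaining else remaining
    List.replicate n.toNat t ++ getTimestampAltAux fs (t + 1) (remaining - n)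
  else []
termination_by remaining.toNat
decreasing_by
  split <;> omega

def getTimestamp_alt (initial_time : Int) (datalength : Int) (fs : Int) : List Int :=
  getTimestampAltAux fs initial_time datalength

-- ===== PRECONDITION & SPEC =====
def Spec_getTimestamp (initial_time : Int) (datalength : Int) (fs : Int) (out : List Int) : Prop := out = getTimestamp_alt initial_time datalength fs
instance (initial_time : Int) (datalength : Int) (fs : Int) (out : List Int) : Decidable (Spec_getTimestamp initial_time datalength fs out) := by unfold Spec_getTimestamp; infer_instance

-- ===== CLAIM (what is proved, stated in full; the proofs are below) =====
def Claim_equal_getTimestamp : Prop := ∀ (initial_time : Int) (datalength : Int) (fs : Int), Dom_getTimestamp initial_time datalength fs → Spec_getTimestamp initial_time datalength fs (getTimestamp initial_time datalength fs)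

-- ===== LEMMAS AND PROOFS =====

-- accumulator-free form of A's loop (recursion on the number of remaining iterations)
def aAux (fs : Int) (t : Int) (flag : Int) : Nat → List Int
  | 0 => []
  | k + 1 =>
    t :: (if flag + 1 = fs then aAux fs (t + 1) 0 k else aAux fs t (flag + 1) k)

theorem foldl_eq_aAux (fs : Int) (l : List Int) :
    ∀ (acc : List Int) (t flag : Int),
      (l.foldl (fun (st : List Int × Int × Int) _ =>
        let timelist := st.1 ++ [st.2.1]
        let fl := st.2.2 + 1
        if fl = fs then (timelist, st.2.1 + 1, 0) else (timelist, st.2.1, fl))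
        (acc, t, flag)).1 = acc ++ aAux fs t flag l.length := by
  induction l with
  | nil => intro acc t flag; simp [aAux]
  | cons x xs ih =>
    intro acc t flag
    simp only [List.foldl_cons, List.length_cons, aAux]
    by_cases h : flag + 1 = fs
    · simp [h, ih]
    · simp [h, ih]

-- one run of A's loop with flag f (0 ≤ f < fs) is a block of min (fs - f) k copies of t
theorem aAux_chunk (fs : Int) (_hfs : 0 < fs) :
    ∀ (k : Nat) (t flag : Int), 0 ≤ flag → flag < fs →
      aAux fs t flag k =
        List.replicate (min (fs - flag).toNat k) t ++ aAux fs (t + 1) 0 (k - (fs - flag).toNat) := by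
  intro k
  induction k with
  | zero => intro t flag _ _; simp [aAux]
  | succ k ih =>
    intro t flag h0 h1
    by_cases h : flag + 1 = fs
    · have h2 : (fs - flag).toNat = 1 := by omega
      simp [aAux, h, h2]
    · have h2 : flag + 1 < fs := by omega
      have h3 : min (fs - flag).toNat (k + 1) = min (fs - (flag + 1)).toNat k + 1 := by omega
      have h4 : (k + 1) - (fs - flag).toNat = k - (fs - (flag + 1)).toNat := by omega
      simp only [aAux, if_neg h, ih t (flag + 1) (by omega) h2, h3, h4, List.replicate_succ,
        List.cons_append]

-- fs ≤ 0: the flag (always ≥ 0) never reaches fs, so A yields a constant list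
theorem aAux_const (fs : Int) (_hfs : fs ≤ 0) :
    ∀ (k : Nat) (t flag : Int), 0 ≤ flag → aAux fs t flag k = List.replicate k t := by
  intro k
  induction k with
  | zero => intro t flag _; simp [aAux]
  | succ k ih =>
    intro t flag h0
    have h : ¬ (flag + 1 = fs) := by omega
    simp [aAux, h, ih t (flag + 1) (by omega), List.replicate_succ]

theorem aAux_eq_altAux (fs : Int) :
    ∀ (n : Nat) (t r : Int), r.toNat = n → aAux fs t 0 n = getTimestampAltAux fs t r := by
  intro n
  induction n using Nat.strong_induction_on with
  | _ n ih =>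
    intro t r hr
    by_cases hpos : 0 < r
    · rw [getTimestampAltAux.eq_def]
      simp only [dif_pos hpos]
      by_cases hfs : 0 < fs
      · rw [aAux_chunk fs hfs n t 0 le_rfl hfs]
        simp only [if_pos hfs]
        congr 1
        · congr 1; omega
        · have h3 : (r - min fs r).toNat = n - (fs - 0).toNat := by omega
          have h4 : n - (fs - 0).toNat < n := by omega
          exact ih _ h4 (t + 1) (r - min fs r) h3
      · rw [aAux_const fs (by omega) n t 0 le_rfl]
        simp only [if_neg (by omega : ¬ 0 < fs)]
        rw [getTimestampAltAux.eq_def]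
        simp only [dif_neg (by omega : ¬ (0:Int) < r - r)]
        simp [hr]
    · have hn : n = 0 := by omega
      rw [getTimestampAltAux.eq_def]
      simp [hn, aAux, dif_neg hpos]

-- ===== VERDICT (by name: the statement is the Claim_ definition above) =====
theorem getTimestamp_spec : Claim_equal_getTimestamp := by
  intro initial_time datalength fs _
  unfold Spec_getTimestamp getTimestamp getTimestamp_alt
  rw [foldl_eq_aAux]
  rw [PySem.List.length_pyRange_one]
  simp only [List.nil_append]
  exact aAux_eq_altAux fs (datalength - 0).toNat initial_time datalength (by omega)
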